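-- pv_equiv track=rewrite | github.com/sheng1993/datastructures_algorithms | notebook/notebook_undirected.py | dfs
-- ===== SOURCE A (Python) =====
-- class Clock:
--     def __init__(self):
--         self._current = 0
--
--     def current(self):
--         return self._current
--
--     def next(self):
--         self._current += 1
--
-- def dfs(graph: dict):
--     visited = dict()
--     cc = dict()
--     _c = 1
--     prev = dict()
--     post = dict()
--     clock = Clock()
--
--     for e in graph.keys():
--         if e not in visited:
--             explore(graph, e, _c, visited, cc, prev, post, clock)
--             _c += 1
--     return visited, cc, prev, post
--
-- def explore(graph: dict, v: str, _c: int, visited: dict, cc: dict, prev: dict, post: dict, clock: Clock):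
--     pre_visit(v, prev, clock)
--     visited[v] = True
--     cc[v] = _c
--     for e in graph[v]:
--         if e not in visited:
--             explore(graph, e, _c, visited, cc, prev, post, clock)
--     post_visit(v, post, clock)
--
-- def pre_visit(v: str, prev: dict, clock: Clock):
--     prev[v] = clock.current()
--     clock.next()
--
-- def post_visit(v: str, post: dict, clock: Clock):
--     post[v] = clock.current()
--     clock.next()
-- ===== SOURCE B (Python) =====
-- def dfs(graph: dict):
--     # Iterative DFS with an explicit stack and entry/exit markers instead of recursion.
--     visited = dict()
--     cc = dict()
--     prev = dict()
--     post = dict()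
--     c = 1
--     clock = 0
--     for s in graph.keys():
--         if s in visited:
--             continue
--         stack = [("visit", s)]
--         while stack:
--             tag, v = stack.pop()
--             if tag == "post":
--                 post[v] = clock
--                 clock += 1
--             elif v not in visited:
--                 visited[v] = True
--                 cc[v] = c
--                 prev[v] = clock
--                 clock += 1
--                 stack.append(("post", v))
--                 for e in reversed(graph[v]):
--                     stack.append(("visit", e))
--         c += 1
--     return visited, cc, prev, post
-- ===== Notes on version B (the rewrite author's own statement) =====
-- stated objective: alternative
-- what changed: Recursive DFS (explore + Clock object mutated through helper calls) replaced by an iterative stack machine with visit/post markers and a plain integer clock, reproducing the exact exploration order and pre/post timestamps.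
import Mathlib
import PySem

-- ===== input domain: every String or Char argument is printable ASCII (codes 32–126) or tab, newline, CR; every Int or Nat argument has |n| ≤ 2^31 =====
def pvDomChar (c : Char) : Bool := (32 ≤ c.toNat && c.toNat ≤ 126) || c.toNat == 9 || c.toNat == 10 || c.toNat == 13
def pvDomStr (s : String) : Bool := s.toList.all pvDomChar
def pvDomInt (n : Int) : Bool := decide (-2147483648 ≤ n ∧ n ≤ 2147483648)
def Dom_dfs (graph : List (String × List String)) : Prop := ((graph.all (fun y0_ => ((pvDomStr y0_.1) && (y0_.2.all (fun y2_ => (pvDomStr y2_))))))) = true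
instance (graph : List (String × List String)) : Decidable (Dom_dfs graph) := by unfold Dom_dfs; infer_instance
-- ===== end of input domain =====

-- B replaces A's recursive DFS (explore + a mutated Clock object) by an iterative stack machine
-- with visit/post markers and an integer clock; return values are proved equal on graphs whose
-- adjacency lists mention only keys of the graph (elsewhere A raises KeyError).


-- ===== PORT A =====

-- The DFS state shared by both ports: the four dicts and the clock (A's Clock object is the field clk).
structure DfsSt where
  vis : PySem.Dict String Bool
  cc : PySem.Dict String Int
  prevT : PySem.Dict String Int
  postT : PySem.Dict String Int
  clk : Int
deriving Repr, DecidableEq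

-- graph[v]; the none branch is Python's KeyError, excluded by Pre_dfs.
def adjOf (graph : List (String × List String)) (v : String) : List String :=
  match graph.find? (fun p => p.1 == v) with
  | some p => p.2
  | none => []

-- pre_visit: prev[v] = clock.current(); clock.next()
def preVisit (v : String) (st : DfsSt) : DfsSt :=
  { st with prevT := st.prevT.insert v st.clk, clk := st.clk + 1 }

-- post_visit: post[v] = clock.current(); clock.next()
def postVisit (v : String) (st : DfsSt) : DfsSt :=
  { st with postT := st.postT.insert v st.clk, clk := st.clk + 1 }

-- explore(graph, v, _c, visited, cc, prev, post, clock); fuel guard only (never reached under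
-- Pre_dfs: the recursion depth is bounded by the number of graph entries).
def exploreA (graph : List (String × List String)) : Nat → String → Int → DfsSt → DfsSt
  | 0, _, _, st => st
  | f + 1, v, c, st =>
    let st1 := preVisit v st
    let st2 := { st1 with vis := st1.vis.insert v true, cc := st1.cc.insert v c }
    let st3 := (adjOf graph v).foldl
      (fun s e => if s.vis.contains e then s else exploreA graph f e c s) st2
    postVisit v st3

def dfs (graph : List (String × List String)) :
    (List (String × Bool)) × (List (String × Int)) × (List (String × Int)) × (List (String × Int)) :=
  let fin := (graph.map Prod.fst).foldl
    (fun (p : Int × DfsSt) e =>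
      if p.2.vis.contains e then p
      else (p.1 + 1, exploreA graph (graph.length + 1) e p.1 p.2))
    (1, ⟨PySem.Dict.empty, PySem.Dict.empty, PySem.Dict.empty, PySem.Dict.empty, 0⟩)
  (fin.2.vis.items, fin.2.cc.items, fin.2.prevT.items, fin.2.postT.items)

-- ===== PORT B =====

inductive DfsFrame where
  | visit : String → DfsFrame
  | post : String → DfsFrame
deriving Repr, DecidableEq

-- fuel bound for the while loop: 1 + Σ over entries of (deg + 1); the 0 branch is never reached.
def fuelB (graph : List (String × List String)) : Nat :=
  1 + graph.length + (graph.map (fun p => p.2.length)).sum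

-- one while-loop execution: pop a frame, process it ('reversed' pushes via foldl-cons).
def runB (graph : List (String × List String)) : Nat → List DfsFrame → Int → DfsSt → DfsSt
  | _, [], _, st => st
  | 0, _, _, st => st
  | f + 1, DfsFrame.post v :: rest, c, st => runB graph f rest c (postVisit v st)
  | f + 1, DfsFrame.visit v :: rest, c, st =>
    if st.vis.contains v then runB graph f rest c st
    else
      let st1 := { st with vis := st.vis.insert v true, cc := st.cc.insert v c }
      let st2 := { st1 with prevT := st1.prevT.insert v st1.clk, clk := st1.clk + 1 }
      runB graph f
        ((adjOf graph v).reverse.foldl (fun s e => DfsFrame.visit e :: s) (DfsFrame.post v :: rest))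
        c st2

def dfs_alt (graph : List (String × List String)) :
    (List (String × Bool)) × (List (String × Int)) × (List (String × Int)) × (List (String × Int)) :=
  let fin := (graph.map Prod.fst).foldl
    (fun (p : Int × DfsSt) s =>
      if p.2.vis.contains s then p
      else (p.1 + 1, runB graph (fuelB graph) [DfsFrame.visit s] p.1 p.2))
    (1, ⟨PySem.Dict.empty, PySem.Dict.empty, PySem.Dict.empty, PySem.Dict.empty, 0⟩)
  (fin.2.vis.items, fin.2.cc.items, fin.2.prevT.items, fin.2.postT.items)

-- ===== PRECONDITION & SPEC =====

-- Pre_dfs: every neighbour occurring in an adjacency list is itself a key of the graph;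
-- on any other input A's explore does graph[v] on a missing key and raises KeyError.
def Pre_dfs (graph : List (String × List String)) : Prop :=
  ∀ p ∈ graph, ∀ e ∈ p.2, e ∈ graph.map Prod.fst
instance (graph : List (String × List String)) : Decidable (Pre_dfs graph) := by
  unfold Pre_dfs; infer_instance

def pvWitness_dfs : (List (String × List String)) := [("a", ["b", "a"]), ("b", []), ("c", ["a"])]

def Spec_dfs (graph : List (String × List String)) (out : (List (String × Bool)) × (List (String × Int)) × (List (String × Int)) × (List (String × Int))) : Prop := out = dfs_alt graph
instance (graph : List (String × List String)) (out : (List (String × Bool)) × (List (String × Int)) × (List (String × Int)) × (List (String × Int))) : Decidable (Spec_dfs graph out) := by unfold Spec_dfs; infer_instance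

-- ===== CLAIM (what is proved, stated in full; the proofs are below) =====
def Claim_equal_dfs : Prop := ∀ (graph : List (String × List String)), Dom_dfs graph → Pre_dfs graph → Spec_dfs graph (dfs graph)

-- ===== LEMMAS AND PROOFS =====

-- the combined 'mark' state both ports build when first processing an unvisited v
def markSt (v : String) (c : Int) (st : DfsSt) : DfsSt :=
  ⟨st.vis.insert v true, st.cc.insert v c, st.prevT.insert v st.clk, st.postT, st.clk + 1⟩

theorem exploreA_succ (graph : List (String × List String)) (f : Nat) (v : String) (c : Int) (st : DfsSt) :
    exploreA graph (f + 1) v c st =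
      postVisit v ((adjOf graph v).foldl
        (fun s e => if s.vis.contains e then s else exploreA graph f e c s) (markSt v c st)) := rfl


-- weighted count of graph entries whose key is not yet visited (parametrised weight so it serves
-- both as A's recursion-depth measure and as B's stack measure)
def wsum (w : String × List String → Nat) (graph : List (String × List String))
    (d : PySem.Dict String Bool) : Nat :=
  ((graph.filter (fun p => !d.contains p.1)).map w).sum

def cntK (graph : List (String × List String)) (st : DfsSt) : Nat :=
  wsum (fun _ => 1) graph st.vis

def cntW (graph : List (String × List String)) (st : DfsSt) : Nat :=
  wsum (fun p => p.2.length + 1) graph st.vis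

theorem wsum_mono (w : String × List String → Nat) (graph : List (String × List String))
    (d d' : PySem.Dict String Bool) (h : ∀ k, d.contains k = true → d'.contains k = true) :
    wsum w graph d' ≤ wsum w graph d := by
  induction graph with
  | nil => simp [wsum]
  | cons p gs ih =>
    cases hc' : d'.contains p.1 with
    | true =>
      cases hc : d.contains p.1 with
      | true => simpa [wsum, List.filter_cons, hc, hc'] using ih
      | false =>
        have := ih
        simp [wsum, hc, hc'] at *
        omega
    | false =>
      have hc : d.contains p.1 = false := by
        cases hc : d.contains p.1 with
        | true => exact absurd (h _ hc) (by simp [hc'])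
        | false => rfl
      have := ih
      simp [wsum, hc, hc'] at *
      omega

theorem wsum_insert_le (w : String × List String → Nat) (graph : List (String × List String))
    (d : PySem.Dict String Bool) (v : String)
    (hk : v ∈ graph.map Prod.fst) (hv : d.contains v = false) :
    wsum w graph (d.insert v true) + w (v, adjOf graph v) ≤ wsum w graph d := by
  induction graph with
  | nil => simp at hk
  | cons p gs ih =>
    by_cases hpv : p.1 = v
    · have hadj : adjOf (p :: gs) v = p.2 := by
        simp [adjOf, hpv]
      have hwp : w (v, p.2) = w p := by
        subst hpv; rfl
      have h1 : wsum w (p :: gs) d = w p + wsum w gs d := by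
        simp [wsum, hpv, hv]
      have h2 : wsum w (p :: gs) (d.insert v true) = wsum w gs (d.insert v true) := by
        have : (d.insert v true).contains p.1 = true := by
          rw [hpv]; exact PySem.Dict.contains_insert_self d v true
        simp [wsum, this]
      have h3 : wsum w gs (d.insert v true) ≤ wsum w gs d := by
        apply wsum_mono
        intro k hkk
        rw [PySem.Dict.contains_insert]
        simp [hkk]
      rw [hadj, h1, h2, hwp]
      omega
    · have hadj : adjOf (p :: gs) v = adjOf gs v := by
        simp [adjOf, hpv]
      have hk' : v ∈ gs.map Prod.fst := by
        simp only [List.map_cons, List.mem_cons] at hk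
        rcases hk with h | h
        · exact absurd h.symm hpv
        · exact h
      have hcins : (d.insert v true).contains p.1 = d.contains p.1 := by
        rw [PySem.Dict.contains_insert]
        simp [show (p.1 == v) = false by simpa using hpv]
      have ih' := ih hk'
      cases hc : d.contains p.1 with
      | true =>
        simp only [wsum, List.filter_cons, hcins, hc] at *
        simpa [hadj] using ih'
      | false =>
        simp only [wsum, List.filter_cons, hcins, hc, Bool.not_false, if_true,
          List.map_cons, List.sum_cons] at *
        rw [hadj]
        omega

theorem wsum_le_total (w : String × List String → Nat) (graph : List (String × List String))
    (d : PySem.Dict String Bool) : wsum w graph d ≤ (graph.map w).sum := by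
  induction graph with
  | nil => simp [wsum]
  | cons p gs ih =>
    simp only [wsum, List.filter_cons] at *
    cases d.contains p.1 <;> simp <;> omega


theorem adj_mem_keys (graph : List (String × List String)) (hC : Pre_dfs graph) (v : String) :
    ∀ e ∈ adjOf graph v, e ∈ graph.map Prod.fst := by
  intro e he
  unfold adjOf at he
  cases hfind : graph.find? (fun p => p.1 == v) with
  | none => rw [hfind] at he; simp at he
  | some p =>
    rw [hfind] at he
    exact hC p (List.mem_of_find?_eq_some hfind) e he

theorem exploreA_vis_mono (graph : List (String × List String)) :
    ∀ f v c (st : DfsSt) k, st.vis.contains k = true →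
      (exploreA graph f v c st).vis.contains k = true := by
  intro f
  induction f with
  | zero => intro v c st k h; simpa [exploreA] using h
  | succ f ih =>
    intro v c st k h
    rw [exploreA_succ]
    have hm : (markSt v c st).vis.contains k = true := by
      show (st.vis.insert v true).contains k = true
      rw [PySem.Dict.contains_insert]; simp [h]
    suffices haux : ∀ (l : List String) (s : DfsSt), s.vis.contains k = true →
        ((l.foldl (fun s e => if s.vis.contains e then s else exploreA graph f e c s) s).vis.contains
          k = true) by
      simpa [postVisit] using haux _ _ hm
    intro l
    induction l with
    | nil => intro s hs; simpa using hs
    | cons e l ihl =>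
      intro s hs
      simp only [List.foldl_cons]
      by_cases hc : s.vis.contains e = true
      · rw [if_pos hc]; exact ihl s hs
      · rw [if_neg hc]; exact ihl _ (ih e c s k hs)

theorem wsum_exploreA_le (w : String × List String → Nat) (graph : List (String × List String))
    (f : Nat) (v : String) (c : Int) (st : DfsSt) :
    wsum w graph (exploreA graph f v c st).vis ≤ wsum w graph st.vis :=
  wsum_mono w graph st.vis _ (fun k hk => exploreA_vis_mono graph f v c st k hk)

theorem exploreA_irrel (graph : List (String × List String)) (hC : Pre_dfs graph) :
    ∀ n f1 f2 v c (st : DfsSt), cntK graph st ≤ n → cntK graph st < f1 → cntK graph st < f2 →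
      st.vis.contains v = false → v ∈ graph.map Prod.fst →
      exploreA graph f1 v c st = exploreA graph f2 v c st := by
  intro n
  induction n using Nat.strong_induction_on with
  | _ n IH =>
    intro f1 f2 v c st hn h1 h2 hv hk
    obtain ⟨a, rfl⟩ : ∃ a, f1 = a + 1 := ⟨f1 - 1, by omega⟩
    obtain ⟨b, rfl⟩ : ∃ b, f2 = b + 1 := ⟨f2 - 1, by omega⟩
    rw [exploreA_succ, exploreA_succ]
    have hmark : (markSt v c st).vis = st.vis.insert v true := rfl
    have hm : cntK graph (markSt v c st) + 1 ≤ cntK graph st := by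
      have h := wsum_insert_le (fun _ => 1) graph st.vis v hk hv
      simp only at h
      unfold cntK
      rw [hmark]
      omega
    congr 1
    have hadj := adj_mem_keys graph hC v
    generalize hL : adjOf graph v = L at hadj
    set m := cntK graph (markSt v c st) with hmdef
    suffices haux : ∀ (l : List String), (∀ e ∈ l, e ∈ graph.map Prod.fst) →
        ∀ s : DfsSt, cntK graph s ≤ m →
        l.foldl (fun s e => if s.vis.contains e then s else exploreA graph a e c s) s =
        l.foldl (fun s e => if s.vis.contains e then s else exploreA graph b e c s) s by
      exact haux L hadj (markSt v c st) (le_refl m)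
    intro l
    induction l with
    | nil => intro _ s _; rfl
    | cons e l ihl =>
      intro hl s hs
      simp only [List.foldl_cons]
      by_cases hc : s.vis.contains e = true
      · rw [if_pos hc, if_pos hc]
        exact ihl (fun x hx => hl x (List.mem_cons_of_mem e hx)) s hs
      · rw [if_neg hc, if_neg hc]
        have hcf : s.vis.contains e = false := by
          cases hcc : s.vis.contains e
          · rfl
          · exact absurd hcc hc
        have hek : e ∈ graph.map Prod.fst := hl e (List.mem_cons_self)
        have heq : exploreA graph a e c s = exploreA graph b e c s := by
          apply IH (cntK graph s) (by omega) a b e c s (le_refl _) (by omega) (by omega) hcf hek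
        rw [heq]
        apply ihl (fun x hx => hl x (List.mem_cons_of_mem e hx))
        calc cntK graph (exploreA graph b e c s) ≤ cntK graph s :=
              wsum_exploreA_le _ graph b e c s
          _ ≤ m := hs


def goodStack (graph : List (String × List String)) (stack : List DfsFrame) : Prop :=
  ∀ v, DfsFrame.visit v ∈ stack → v ∈ graph.map Prod.fst

def measB (graph : List (String × List String)) (stack : List DfsFrame) (st : DfsSt) : Nat :=
  stack.length + cntW graph st

theorem cntW_postVisit (graph : List (String × List String)) (v : String) (st : DfsSt) :
    cntW graph (postVisit v st) = cntW graph st := rfl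

theorem cntW_markSt (graph : List (String × List String)) (v : String) (c : Int) (st : DfsSt)
    (hk : v ∈ graph.map Prod.fst) (hv : st.vis.contains v = false) :
    cntW graph (markSt v c st) + (adjOf graph v).length + 1 ≤ cntW graph st := by
  have h := wsum_insert_le (fun p => p.2.length + 1) graph st.vis v hk hv
  simp only at h
  unfold cntW
  have hmark : (markSt v c st).vis = st.vis.insert v true := rfl
  rw [hmark]
  omega

theorem rev_foldl_cons (l : List String) (init : List DfsFrame) :
    l.reverse.foldl (fun s e => DfsFrame.visit e :: s) init = l.map DfsFrame.visit ++ init := by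
  induction l generalizing init with
  | nil => rfl
  | cons e l ih =>
    simp only [List.reverse_cons, List.foldl_append, List.foldl_cons, List.foldl_nil,
      List.map_cons, List.cons_append]
    rw [ih]

theorem runB_nil (graph : List (String × List String)) (f : Nat) (c : Int) (st : DfsSt) :
    runB graph f [] c st = st := by cases f <;> rfl

theorem runB_succ_post (graph : List (String × List String)) (f : Nat) (v : String)
    (rest : List DfsFrame) (c : Int) (st : DfsSt) :
    runB graph (f + 1) (DfsFrame.post v :: rest) c st = runB graph f rest c (postVisit v st) := rfl

theorem runB_succ_visit_true (graph : List (String × List String)) (f : Nat) (v : String)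
    (rest : List DfsFrame) (c : Int) (st : DfsSt) (h : st.vis.contains v = true) :
    runB graph (f + 1) (DfsFrame.visit v :: rest) c st = runB graph f rest c st := by
  simp [runB, h]

theorem runB_succ_visit_false (graph : List (String × List String)) (f : Nat) (v : String)
    (rest : List DfsFrame) (c : Int) (st : DfsSt) (h : st.vis.contains v = false) :
    runB graph (f + 1) (DfsFrame.visit v :: rest) c st =
      runB graph f ((adjOf graph v).map DfsFrame.visit ++ DfsFrame.post v :: rest) c (markSt v c st) := by
  rw [runB.eq_def]
  simp only [h, Bool.false_eq_true, if_false, rev_foldl_cons]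
  rfl

theorem goodStack_tail (graph : List (String × List String)) (fr : DfsFrame) (rest : List DfsFrame)
    (good : goodStack graph (fr :: rest)) : goodStack graph rest :=
  fun u hu => good u (List.mem_cons_of_mem fr hu)

theorem goodStack_expand (graph : List (String × List String)) (hC : Pre_dfs graph) (v : String)
    (rest : List DfsFrame) (good : goodStack graph (DfsFrame.visit v :: rest)) :
    goodStack graph ((adjOf graph v).map DfsFrame.visit ++ DfsFrame.post v :: rest) := by
  intro u hu
  rcases List.mem_append.1 hu with h | h
  · rcases List.mem_map.1 h with ⟨e, he, heq⟩
    injection heq with h2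
    subst h2
    exact adj_mem_keys graph hC v e he
  · rcases List.mem_cons.1 h with h | h
    · cases h
    · exact good u (List.mem_cons_of_mem _ h)

theorem runB_irrel (graph : List (String × List String)) (hC : Pre_dfs graph) :
    ∀ f1 f2 (stack : List DfsFrame) (c : Int) (st : DfsSt), goodStack graph stack →
      measB graph stack st ≤ f1 → measB graph stack st ≤ f2 →
      runB graph f1 stack c st = runB graph f2 stack c st := by
  intro f1
  induction f1 with
  | zero =>
    intro f2 stack c st good h1 h2
    cases stack with
    | nil => rw [runB_nil, runB_nil]
    | cons fr rest => simp [measB] at h1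
  | succ f ih =>
    intro f2 stack c st good h1 h2
    cases stack with
    | nil => rw [runB_nil, runB_nil]
    | cons fr rest =>
      obtain ⟨b, rfl⟩ : ∃ b, f2 = b + 1 := ⟨f2 - 1, by simp [measB] at h2; omega⟩
      have hms : measB graph (fr :: rest) st = measB graph rest st + 1 := by
        simp [measB]; omega
      cases fr with
      | post v =>
        rw [runB_succ_post, runB_succ_post]
        apply ih b rest c (postVisit v st) (goodStack_tail graph _ rest good)
        · simp only [measB, cntW_postVisit]; simp [measB] at h1; omega
        · simp only [measB, cntW_postVisit]; simp [measB] at h2; omega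
      | visit v =>
        by_cases hc : st.vis.contains v = true
        · rw [runB_succ_visit_true graph _ v rest c st hc,
            runB_succ_visit_true graph _ v rest c st hc]
          apply ih b rest c st (goodStack_tail graph _ rest good)
          · simp [measB] at h1 ⊢; omega
          · simp [measB] at h2 ⊢; omega
        · have hcf : st.vis.contains v = false := by
            cases hcc : st.vis.contains v
            · rfl
            · exact absurd hcc hc
          have hk : v ∈ graph.map Prod.fst := good v List.mem_cons_self
          rw [runB_succ_visit_false graph _ v rest c st hcf,
            runB_succ_visit_false graph _ v rest c st hcf]
          have hdrop := cntW_markSt graph v c st hk hcf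
          have hmeas : measB graph ((adjOf graph v).map DfsFrame.visit ++ DfsFrame.post v :: rest)
              (markSt v c st) + 1 ≤ measB graph (DfsFrame.visit v :: rest) st := by
            simp [measB]
            omega
          apply ih b _ c (markSt v c st) (goodStack_expand graph hC v rest good)
          · simp [measB] at h1 hmeas ⊢; omega
          · simp [measB] at h2 hmeas ⊢; omega

def runT (graph : List (String × List String)) (stack : List DfsFrame) (c : Int) (st : DfsSt) :
    DfsSt :=
  runB graph (measB graph stack st) stack c st

theorem runB_eq_runT (graph : List (String × List String)) (hC : Pre_dfs graph) (f : Nat)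
    (stack : List DfsFrame) (c : Int) (st : DfsSt) (good : goodStack graph stack)
    (h : measB graph stack st ≤ f) : runB graph f stack c st = runT graph stack c st :=
  runB_irrel graph hC f (measB graph stack st) stack c st good h (le_refl _)

theorem runT_nil (graph : List (String × List String)) (c : Int) (st : DfsSt) :
    runT graph [] c st = st := runB_nil graph _ c st

theorem runT_post (graph : List (String × List String)) (v : String) (rest : List DfsFrame)
    (c : Int) (st : DfsSt) :
    runT graph (DfsFrame.post v :: rest) c st = runT graph rest c (postVisit v st) := by
  unfold runT
  have hlen : measB graph (DfsFrame.post v :: rest) st =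
      measB graph rest (postVisit v st) + 1 := by
    simp [measB, cntW_postVisit]; omega
  rw [hlen, runB_succ_post]

theorem runT_visit_true (graph : List (String × List String)) (v : String) (rest : List DfsFrame)
    (c : Int) (st : DfsSt) (h : st.vis.contains v = true) :
    runT graph (DfsFrame.visit v :: rest) c st = runT graph rest c st := by
  unfold runT
  have hlen : measB graph (DfsFrame.visit v :: rest) st = measB graph rest st + 1 := by
    simp [measB]; omega
  rw [hlen, runB_succ_visit_true graph _ v rest c st h]

theorem runT_visit_false (graph : List (String × List String)) (hC : Pre_dfs graph) (v : String)
    (rest : List DfsFrame) (c : Int) (st : DfsSt)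
    (good : goodStack graph (DfsFrame.visit v :: rest)) (h : st.vis.contains v = false) :
    runT graph (DfsFrame.visit v :: rest) c st =
      runT graph ((adjOf graph v).map DfsFrame.visit ++ DfsFrame.post v :: rest) c (markSt v c st) := by
  have hk : v ∈ graph.map Prod.fst := good v List.mem_cons_self
  have hdrop := cntW_markSt graph v c st hk h
  conv_lhs => unfold runT
  have hlen : measB graph (DfsFrame.visit v :: rest) st = (rest.length + cntW graph st) + 1 := by
    simp [measB]; omega
  rw [hlen, runB_succ_visit_false graph _ v rest c st h]
  apply runB_eq_runT graph hC _ _ c _ (goodStack_expand graph hC v rest good)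
  simp [measB]
  omega


def exploreT (graph : List (String × List String)) (v : String) (c : Int) (st : DfsSt) : DfsSt :=
  exploreA graph (cntK graph st + 1) v c st

theorem exploreA_eq_T (graph : List (String × List String)) (hC : Pre_dfs graph) (f : Nat)
    (v : String) (c : Int) (st : DfsSt) (h : cntK graph st < f)
    (hv : st.vis.contains v = false) (hk : v ∈ graph.map Prod.fst) :
    exploreA graph f v c st = exploreT graph v c st :=
  exploreA_irrel graph hC (cntK graph st) f (cntK graph st + 1) v c st (le_refl _) h
    (Nat.lt_succ_self _) hv hk

theorem cntK_markSt (graph : List (String × List String)) (v : String) (c : Int) (st : DfsSt)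
    (hk : v ∈ graph.map Prod.fst) (hv : st.vis.contains v = false) :
    cntK graph (markSt v c st) + 1 ≤ cntK graph st := by
  have h := wsum_insert_le (fun _ => 1) graph st.vis v hk hv
  simp only at h
  unfold cntK
  have hmark : (markSt v c st).vis = st.vis.insert v true := rfl
  rw [hmark]
  omega

-- the heart of the equivalence: popping an unvisited visit-marker runs exactly one recursive explore
theorem sim (graph : List (String × List String)) (hC : Pre_dfs graph) :
    ∀ n (st : DfsSt) (v : String) (c : Int) (rest : List DfsFrame), cntK graph st ≤ n →
      goodStack graph rest → st.vis.contains v = false → v ∈ graph.map Prod.fst →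
      runT graph (DfsFrame.visit v :: rest) c st = runT graph rest c (exploreT graph v c st) := by
  intro n
  induction n using Nat.strong_induction_on with
  | _ n IH =>
    intro st v c rest hn good hv hk
    have goodcons : goodStack graph (DfsFrame.visit v :: rest) := by
      intro u hu
      rcases List.mem_cons.1 hu with h | h
      · injection h with h2; subst h2; exact hk
      · exact good u h
    rw [runT_visit_false graph hC v rest c st goodcons hv]
    have hm := cntK_markSt graph v c st hk hv
    set m := cntK graph (markSt v c st) with hmdef
    suffices aux : ∀ l : List String, (∀ e ∈ l, e ∈ graph.map Prod.fst) →
        ∀ s : DfsSt, cntK graph s ≤ m →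
        runT graph (l.map DfsFrame.visit ++ DfsFrame.post v :: rest) c s =
          runT graph (DfsFrame.post v :: rest) c
            (l.foldl (fun s e => if s.vis.contains e then s else
              exploreA graph (cntK graph st) e c s) s) by
      have h1 := aux (adjOf graph v) (adj_mem_keys graph hC v) (markSt v c st) (le_refl m)
      rw [h1, runT_post]
      unfold exploreT
      rw [exploreA_succ]
    intro l
    induction l with
    | nil => intro _ s _; simp only [List.map_nil, List.nil_append, List.foldl_nil]
    | cons e l ihl =>
      intro hl s hs
      simp only [List.map_cons, List.cons_append, List.foldl_cons]
      by_cases hc : s.vis.contains e = true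
      · rw [runT_visit_true graph e _ c s hc, if_pos hc]
        exact ihl (fun x hx => hl x (List.mem_cons_of_mem e hx)) s hs
      · have hcf : s.vis.contains e = false := by
          cases hcc : s.vis.contains e
          · rfl
          · exact absurd hcc hc
        have hek : e ∈ graph.map Prod.fst := hl e List.mem_cons_self
        have hfuel : cntK graph s < cntK graph st := by omega
        have hEq := exploreA_eq_T graph hC (cntK graph st) e c s hfuel hcf hek
        have goodtail : goodStack graph (l.map DfsFrame.visit ++ DfsFrame.post v :: rest) := by
          intro u hu
          rcases List.mem_append.1 hu with h | h
          · rcases List.mem_map.1 h with ⟨x, hx, hxeq⟩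
            injection hxeq with h2
            subst h2
            exact hl x (List.mem_cons_of_mem e hx)
          · rcases List.mem_cons.1 h with h | h
            · cases h
            · exact good u h
        rw [if_neg hc, hEq,
          IH (cntK graph s) (by omega) s e c _ (le_refl _) goodtail hcf hek]
        exact ihl (fun x hx => hl x (List.mem_cons_of_mem e hx)) (exploreT graph e c s)
          (le_trans (wsum_exploreA_le _ graph _ e c s) hs)

theorem cntK_le_len (graph : List (String × List String)) (st : DfsSt) :
    cntK graph st ≤ graph.length := by
  have h2 : ((graph.map (fun _ => (1 : Nat))).sum = graph.length) := by
    induction graph with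
    | nil => rfl
    | cons p gs ih => simp only [List.map_cons, List.sum_cons, List.length_cons]; omega
  have h := wsum_le_total (fun _ => 1) graph st.vis
  unfold cntK
  omega

theorem cntW_le_fuelB (graph : List (String × List String)) (st : DfsSt) :
    cntW graph st + 1 ≤ fuelB graph := by
  have h2 : ((graph.map (fun p => p.2.length + 1)).sum =
      graph.length + (graph.map (fun p => p.2.length)).sum) := by
    induction graph with
    | nil => rfl
    | cons p gs ih => simp only [List.map_cons, List.sum_cons, List.length_cons]; omega
  have h := wsum_le_total (fun p => p.2.length + 1) graph st.vis
  unfold cntW fuelB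
  omega

theorem top_fold (graph : List (String × List String)) (hC : Pre_dfs graph) :
    ∀ ks : List String, (∀ e ∈ ks, e ∈ graph.map Prod.fst) → ∀ p : Int × DfsSt,
      ks.foldl (fun (p : Int × DfsSt) e =>
        if p.2.vis.contains e then p
        else (p.1 + 1, exploreA graph (graph.length + 1) e p.1 p.2)) p =
      ks.foldl (fun (p : Int × DfsSt) s =>
        if p.2.vis.contains s then p
        else (p.1 + 1, runB graph (fuelB graph) [DfsFrame.visit s] p.1 p.2)) p := by
  intro ks
  induction ks with
  | nil => intro _ _; rfl
  | cons e ks ih =>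
    intro hl p
    simp only [List.foldl_cons]
    by_cases hc : p.2.vis.contains e = true
    · rw [if_pos hc, if_pos hc]
      exact ih (fun x hx => hl x (List.mem_cons_of_mem e hx)) p
    · have hcf : p.2.vis.contains e = false := by
        cases hcc : p.2.vis.contains e
        · rfl
        · exact absurd hcc hc
      have hek : e ∈ graph.map Prod.fst := hl e List.mem_cons_self
      have hA : exploreA graph (graph.length + 1) e p.1 p.2 = exploreT graph e p.1 p.2 :=
        exploreA_eq_T graph hC (graph.length + 1) e p.1 p.2
          (Nat.lt_succ_of_le (cntK_le_len graph p.2)) hcf hek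
      have hgood1 : goodStack graph [DfsFrame.visit e] := by
        intro u hu
        rcases List.mem_cons.1 hu with h | h
        · injection h with h2; subst h2; exact hek
        · cases h
      have hB : runB graph (fuelB graph) [DfsFrame.visit e] p.1 p.2 =
          runT graph [DfsFrame.visit e] p.1 p.2 := by
        apply runB_eq_runT graph hC _ _ p.1 p.2 hgood1
        have := cntW_le_fuelB graph p.2
        simp [measB]
        omega
      have hSim := sim graph hC (cntK graph p.2) p.2 e p.1 [] (le_refl _)
        (fun u hu => absurd hu (List.not_mem_nil)) hcf hek
      rw [if_neg hc, if_neg hc, hA, hB, hSim, runT_nil]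
      exact ih (fun x hx => hl x (List.mem_cons_of_mem e hx)) _

-- ===== VERDICT (by name: the statement is the Claim_ definition above) =====
theorem dfs_spec : Claim_equal_dfs := by
  intro graph _ hPre
  show dfs graph = dfs_alt graph
  simp only [dfs, dfs_alt]
  rw [top_fold graph hPre (graph.map Prod.fst) (fun e he => he)]
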